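-- pv_equiv track=rewrite | github.com/AJtwiss01/dataStructures | docStats.py | DocStats
-- ===== SOURCE A (Python) =====
-- def countCharacters(eachLine):
--     charCount = 0
--     for i in eachLine:
--         if not i.isspace():
--             charCount = charCount + 1
--
--     return charCount
--
-- def countWords(numberOfWord):
--     words = numberOfWord.split()
--     return len(words)
--
-- def DocStats(docFile):
--     lineCount = 0
--     totalCharacters = 0
--     totalWords = 0
--     for line in docFile:
--         lineCount = lineCount + 1
--         totalCharacters = totalCharacters + countCharacters(line)
--         totalWords = totalWords + countWords(line)
--     return lineCount, totalCharacters, totalWords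
-- ===== SOURCE B (Python) =====
-- def DocStats(docFile):
--     # Single character-level finite-state machine: a word is counted at each
--     # transition from "not in a word" to a non-space character, so no split()
--     # and no per-line helper passes are needed.
--     lineCount = 0
--     totalCharacters = 0
--     totalWords = 0
--     for line in docFile:
--         lineCount += 1
--         inWord = False
--         for c in line:
--             if c.isspace():
--                 inWord = False
--             else:
--                 totalCharacters += 1
--                 if not inWord:
--                     totalWords += 1
--                 inWord = True
--     return lineCount, totalCharacters, totalWords
-- ===== Notes on version B (the rewrite author's own statement) =====
-- stated objective: alternative
-- what changed: Replaced split()-based word counting and the separate per-line character helper by one character-level finite-state machine that counts word starts (space-to-nonspace transitions) and non-space characters in a single scan, with no string splitting or helper functions.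
import Mathlib
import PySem

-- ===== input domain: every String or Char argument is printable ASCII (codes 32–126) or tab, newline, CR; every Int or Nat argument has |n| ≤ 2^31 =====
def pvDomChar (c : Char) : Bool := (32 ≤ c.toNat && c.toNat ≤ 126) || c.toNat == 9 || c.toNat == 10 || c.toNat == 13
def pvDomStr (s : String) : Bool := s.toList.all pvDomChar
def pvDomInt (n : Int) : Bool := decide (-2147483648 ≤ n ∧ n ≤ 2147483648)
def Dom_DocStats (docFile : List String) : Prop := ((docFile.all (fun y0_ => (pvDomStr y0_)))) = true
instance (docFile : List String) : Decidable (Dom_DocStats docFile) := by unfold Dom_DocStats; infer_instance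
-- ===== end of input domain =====

-- B replaces split()-based word counting by a character-level state machine counting word starts; same results, same cost.
-- ===== PORT A =====
-- helper: character-by-character loop with an accumulator, as in A
def countCharacters (eachLine : String) : Int :=
  eachLine.toList.foldl (fun charCount i => if !(PySem.Chars.isspace i) then charCount + 1 else charCount) 0

-- helper: len(line.split())
def countWords (numberOfWord : String) : Int :=
  ((PySem.Str.split₀ numberOfWord).length : Int)

-- the single loop over lines carrying the three accumulators
def DocStatsLoop (docFile : List String) (acc : Int × Int × Int) : Int × Int × Int :=
  match docFile with
  | [] => acc
  | line :: rest =>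
      DocStatsLoop rest (acc.1 + 1, acc.2.1 + countCharacters line, acc.2.2 + countWords line)

def DocStats (docFile : List String) : Int × Int × Int :=
  DocStatsLoop docFile (0, 0, 0)

-- ===== PORT B =====
-- inner FSM loop over one line's characters; state = (totalCharacters, totalWords, inWord)
def DocStatsAltLine (chars : List Char) (st : Int × Int × Bool) : Int × Int × Bool :=
  match chars with
  | [] => st
  | c :: rest =>
      if PySem.Chars.isspace c then
        DocStatsAltLine rest (st.1, st.2.1, false)
      else
        DocStatsAltLine rest (st.1 + 1, st.2.1 + (if !st.2.2 then 1 else 0), true)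

-- outer loop over lines; state = (lineCount, totalCharacters, totalWords)
def DocStatsAltLoop (docFile : List String) (st : Int × Int × Int) : Int × Int × Int :=
  match docFile with
  | [] => st
  | line :: rest =>
      let inner := DocStatsAltLine line.toList (st.2.1, st.2.2, false)
      DocStatsAltLoop rest (st.1 + 1, inner.1, inner.2.1)

def DocStats_alt (docFile : List String) : Int × Int × Int :=
  DocStatsAltLoop docFile (0, 0, 0)

-- ===== PRECONDITION & SPEC =====
def Spec_DocStats (docFile : List String) (out : Int × Int × Int) : Prop := out = DocStats_alt docFile
instance (docFile : List String) (out : Int × Int × Int) : Decidable (Spec_DocStats docFile out) := by unfold Spec_DocStats; infer_instance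

-- ===== CLAIM (what is proved, stated in full; the proofs are below) =====
def Claim_equal_DocStats : Prop := ∀ (docFile : List String), Dom_DocStats docFile → Spec_DocStats docFile (DocStats docFile)

-- ===== LEMMAS AND PROOFS =====
-- word count of the FSM: number of space→nonspace transitions, given the inWord flag
def wcount (chars : List Char) (inW : Bool) : Int :=
  match chars with
  | [] => 0
  | c :: rest =>
      if PySem.Chars.isspace c then wcount rest false
      else (if !inW then 1 else 0) + wcount rest true

-- final inWord flag of the FSM
def wend (chars : List Char) (inW : Bool) : Bool :=
  match chars with
  | [] => inW
  | c :: rest => if PySem.Chars.isspace c then wend rest false else wend rest true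

theorem altLine_eq (chars : List Char) (tc tw : Int) (b : Bool) :
    DocStatsAltLine chars (tc, tw, b)
      = (tc + ((chars.filter (fun c => !(PySem.Chars.isspace c))).length : Int),
         tw + wcount chars b, wend chars b) := by
  induction chars generalizing tc tw b with
  | nil => simp [DocStatsAltLine, wcount, wend]
  | cons c rest ih =>
    by_cases hc : PySem.Chars.isspace c = true
    · simp [DocStatsAltLine, wcount, wend, hc, ih]
    · simp only [Bool.not_eq_true] at hc
      simp [DocStatsAltLine, wcount, wend, hc, ih]
      constructor
      · ring
      · ring

theorem wcount_nonneg (chars : List Char) (b : Bool) : 0 ≤ wcount chars b := by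
  induction chars generalizing b with
  | nil => simp [wcount]
  | cons c rest ih =>
    by_cases hc : PySem.Chars.isspace c = true
    · simpa [wcount, hc] using ih false
    · simp only [Bool.not_eq_true] at hc
      have := ih true
      by_cases hb : b <;> simp [wcount, hc, hb] <;> omega

-- split₀.go produces acc.length + (pending word) + wcount of the rest
theorem split₀_go_length (chars : List Char) (cur : List Char) (acc : List (List Char)) :
    (PySem.Chars.split₀.go chars cur acc).length
      = acc.length + (if cur.isEmpty then 0 else 1) + (wcount chars (!cur.isEmpty)).toNat := by
  induction chars generalizing cur acc with
  | nil =>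
    by_cases h : cur.isEmpty <;> simp [PySem.Chars.split₀.go, wcount, h]
  | cons c rest ih =>
    have hn := wcount_nonneg rest true
    by_cases hc : PySem.Chars.isspace c = true
    · by_cases h : cur.isEmpty = true
      · simp [PySem.Chars.split₀.go, wcount, hc, h, ih]
      · simp only [Bool.not_eq_true] at h
        simp [PySem.Chars.split₀.go, wcount, hc, h, ih ([]) (cur.reverse :: acc)]
    · simp only [Bool.not_eq_true] at hc
      have hcc : ((c :: cur).isEmpty) = false := by simp [List.isEmpty]
      by_cases h : cur.isEmpty = true
      · simp [PySem.Chars.split₀.go, wcount, hc, h, ih (c :: cur) acc, hcc]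
        omega
      · simp only [Bool.not_eq_true] at h
        simp [PySem.Chars.split₀.go, wcount, hc, h, ih (c :: cur) acc, hcc]

theorem countWords_eq_wcount (line : String) :
    countWords line = wcount line.toList false := by
  unfold countWords
  have h := split₀_go_length line.toList [] []
  have hn := wcount_nonneg line.toList false
  simp [PySem.Str.split₀, PySem.Chars.split₀] at h ⊢
  omega

theorem countCharacters_eq (s : String) :
    countCharacters s = ((s.toList.filter (fun c => !(PySem.Chars.isspace c))).length : Int) := by
  unfold countCharacters
  suffices h : ∀ (l : List Char) (a : Int),
      l.foldl (fun charCount i => if !(PySem.Chars.isspace i) then charCount + 1 else charCount) a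
        = a + ((l.filter (fun c => !(PySem.Chars.isspace c))).length : Int) by
    simpa using h s.toList 0
  intro l
  induction l with
  | nil => intro a; simp
  | cons c rest ih =>
    intro a
    rw [List.foldl]
    by_cases hc : PySem.Chars.isspace c = true
    · rw [if_neg (by simp [hc]), ih]; simp [hc]
    · rw [if_pos (by simp [hc]), ih]; simp [hc]; ring

theorem loops_eq (l : List String) (a b c : Int) :
    DocStatsLoop l (a, b, c) = DocStatsAltLoop l (a, b, c) := by
  induction l generalizing a b c with
  | nil => rfl
  | cons s rest ih =>
    rw [DocStatsLoop, DocStatsAltLoop]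
    simp only [altLine_eq, countCharacters_eq, countWords_eq_wcount]
    exact ih _ _ _

-- ===== VERDICT (by name: the statement is the Claim_ definition above) =====
theorem DocStats_spec : Claim_equal_DocStats := by
  intro docFile _
  unfold Spec_DocStats DocStats DocStats_alt
  exact loops_eq docFile 0 0 0
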